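-- pv_equiv track=rewrite | github.com/AliHisham149/Misalignment-in-FinetunedLLMs | LLMJudge2ndPass/scripts/build_and_append_insecure_datasets.py | find_subsequence_positions
-- ===== SOURCE A (Python) =====
-- from typing import Dict, Any, List, Set
--
-- def find_subsequence_positions(doc_lines: List[str], mini_lines: List[str]) -> List[int]:
--     if not mini_lines: return []
--     n, m = len(doc_lines), len(mini_lines)
--     for i in range(n - m + 1):
--         ok = True
--         for j in range(m):
--             if doc_lines[i + j] != mini_lines[j]:
--                 ok = False
--                 break
--         if ok:
--             return list(range(i, i + m))
--     return []
-- ===== SOURCE B (Python) =====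
-- def find_subsequence_positions(doc_lines, mini_lines):
--     # Rabin-Karp over lines: per-line hashes computed once, additive window
--     # fingerprint rolled in O(1); full block comparison only on fingerprint hit.
--     m = len(mini_lines)
--     if m == 0:
--         return []
--     n = len(doc_lines)
--     if n < m:
--         return []
--     MOD = 1 << 61
--
--     def line_hash(s):
--         v = 0
--         for ch in s:
--             v = (v * 131 + ord(ch)) % MOD
--         return v
--
--     hs = [line_hash(s) for s in doc_lines]
--     target = sum(line_hash(s) for s in mini_lines)
--     i = 0
--     s = sum(hs[:m])
--     while True:
--         if s == target and doc_lines[i:i + m] == mini_lines: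
--             return list(range(i, i + m))
--         if i == n - m:
--             return []
--         s += hs[i + m] - hs[i]
--         i += 1
-- ===== Notes on version B (the rewrite author's own statement) =====
-- stated objective: alternative
-- what changed: Replaces A's nested per-position line-by-line rescan with a Rabin-Karp-style search over lines: per-line hashes are computed once, an additive window fingerprint is rolled in O(1) per position, and a full block comparison is done only on a fingerprint hit.
import Mathlib
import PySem

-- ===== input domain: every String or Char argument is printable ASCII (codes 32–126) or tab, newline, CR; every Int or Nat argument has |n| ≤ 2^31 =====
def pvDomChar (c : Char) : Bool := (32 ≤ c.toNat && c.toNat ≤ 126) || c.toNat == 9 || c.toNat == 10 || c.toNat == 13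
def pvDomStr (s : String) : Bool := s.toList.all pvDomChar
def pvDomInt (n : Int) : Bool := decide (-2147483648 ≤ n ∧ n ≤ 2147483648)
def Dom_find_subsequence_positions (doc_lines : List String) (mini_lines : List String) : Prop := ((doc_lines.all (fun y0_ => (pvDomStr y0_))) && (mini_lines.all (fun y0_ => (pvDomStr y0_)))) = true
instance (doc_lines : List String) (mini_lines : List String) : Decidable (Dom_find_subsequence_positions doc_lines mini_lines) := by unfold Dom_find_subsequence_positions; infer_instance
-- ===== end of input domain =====

-- B replaces A's nested line-by-line rescans with an additive rolling fingerprint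
-- (Rabin–Karp over lines); objective: alternative algorithm, proved to return the same list.

-- ===== PORT A =====
-- inner loop 'for j in range(m): if doc[i+j] != mini[j]: break' (indices always in
-- range when called, so List.getD is exact for Python's doc_lines[i+j])
def pvAOk (doc mini : List String) (i : Nat) : Nat → Nat → Bool
  | _, 0 => true
  | j, rem+1 =>
    if doc.getD (i+j) "" ≠ mini.getD j "" then false
    else pvAOk doc mini i (j+1) rem

-- outer loop 'for i in range(n - m + 1)', fuel = number of iterations left
def pvALoop (doc mini : List String) (m : Nat) : Nat → Nat → List Int
  | _, 0 => []
  | i, fuel+1 =>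
    if pvAOk doc mini i 0 m then PySem.List.pyRange (i : Int) ((i : Int) + (m : Int)) 1
    else pvALoop doc mini m (i+1) fuel

def find_subsequence_positions (doc_lines : List String) (mini_lines : List String) : List Int :=
  if mini_lines = [] then []
  else pvALoop doc_lines mini_lines mini_lines.length 0 (doc_lines.length + 1 - mini_lines.length)

-- ===== PORT B =====
def pvLineHash (s : String) : Int :=
  s.toList.foldl (fun v c => PySem.Int.mod (v * 131 + (c.toNat : Int)) (2^61)) 0

-- the 'while True' loop; fuel = n - m - i rolls remaining (indices i, i+m into hs
-- are always in range when rolling, so List.getD is exact for Python's hs[i])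
def pvBLoop (doc mini : List String) (hs : List Int) (target : Int) (m : Nat) :
    Nat → Int → Nat → List Int
  | i, s, fuel =>
    if s == target && (PySem.List.slice doc (some (i : Int)) (some ((i : Int) + (m : Int))) == mini)
    then PySem.List.pyRange (i : Int) ((i : Int) + (m : Int)) 1
    else match fuel with
      | 0 => []
      | fuel+1 => pvBLoop doc mini hs target m (i+1) (s + hs.getD (i+m) 0 - hs.getD i 0) fuel

def find_subsequence_positions_alt (doc_lines : List String) (mini_lines : List String) : List Int :=
  let m := mini_lines.length
  if m = 0 then []
  else if doc_lines.length < m then []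
  else
    let hs := doc_lines.map pvLineHash
    let target := (mini_lines.map pvLineHash).sum
    pvBLoop doc_lines mini_lines hs target m 0 (hs.take m).sum (doc_lines.length - m)

-- ===== PRECONDITION & SPEC =====
def Spec_find_subsequence_positions (doc_lines : List String) (mini_lines : List String) (out : List Int) : Prop := out = find_subsequence_positions_alt doc_lines mini_lines
instance (doc_lines : List String) (mini_lines : List String) (out : List Int) : Decidable (Spec_find_subsequence_positions doc_lines mini_lines out) := by unfold Spec_find_subsequence_positions; infer_instance

-- ===== CLAIM (what is proved, stated in full; the proofs are below) =====
def Claim_equal_find_subsequence_positions : Prop := ∀ (doc_lines : List String) (mini_lines : List String), Dom_find_subsequence_positions doc_lines mini_lines → Spec_find_subsequence_positions doc_lines mini_lines (find_subsequence_positions doc_lines mini_lines)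

-- ===== LEMMAS AND PROOFS =====

-- A's inner loop decides slice equality
lemma pvAOk_eq (doc mini : List String) (i : Nat) :
    ∀ rem j, j + rem = mini.length → i + mini.length ≤ doc.length →
      pvAOk doc mini i j rem = ((doc.drop (i+j)).take rem == mini.drop j) := by
  intro rem
  induction rem with
  | zero =>
    intro j hj _
    have hd : mini.drop j = [] := List.drop_eq_nil_of_le (by omega)
    simp [pvAOk, hd]
  | succ rem ih =>
    intro j hj hn
    have hjm : j < mini.length := by omega
    have hij : i + j < doc.length := by omega
    have hd : doc.drop (i+j) = doc[i+j] :: doc.drop (i+j+1) := List.drop_eq_getElem_cons hij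
    have hm : mini.drop j = mini[j] :: mini.drop (j+1) := List.drop_eq_getElem_cons hjm
    rw [pvAOk, hd, hm]
    simp only [List.take_succ_cons, List.cons_beq_cons]
    rw [List.getD_eq_getElem doc _ hij, List.getD_eq_getElem mini _ hjm]
    by_cases h : doc[i+j] = mini[j]
    · simp only [h, ne_eq, not_true_eq_false, if_false]
      have := ih (j+1) (by omega) hn
      rw [this]
      simp [show i + (j+1) = i + j + 1 by omega]
    · simp [h]

-- rolling the additive window fingerprint
lemma pvRoll (l : List Int) (i m : Nat) (hm : 0 < m) (h : i + m < l.length) :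
    ((l.drop (i+1)).take m).sum
      = ((l.drop i).take m).sum + l.getD (i+m) 0 - l.getD i 0 := by
  obtain ⟨k, rfl⟩ : ∃ k, m = k + 1 := ⟨m - 1, by omega⟩
  have hlen : k < (l.drop (i+1)).length := by simp; omega
  have h1 : l.drop i = l[i]'(by omega) :: l.drop (i+1) := List.drop_eq_getElem_cons (by omega)
  have h2 : (l.drop (i+1)).take (k+1) = (l.drop (i+1)).take k ++ [(l.drop (i+1))[k]'hlen] := by
    rw [List.take_succ]
    simp [List.getElem?_eq_getElem hlen]
  have h3 : (l.drop (i+1))[k]'hlen = l[i+1+k]'(by omega) := List.getElem_drop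
  have h4 : l[i+1+k]'(by omega) = l[i+(k+1)]'h := by congr 1; omega
  rw [h2, h1, h3, h4,
      List.getD_eq_getElem l _ h, List.getD_eq_getElem l _ (show i < l.length by omega)]
  simp only [List.take_succ_cons, List.sum_cons, List.sum_append, List.sum_nil]
  ring

-- window fingerprint of the true slice
lemma pvWindowSum (doc : List String) (i m : Nat) :
    (((doc.map pvLineHash).drop i).take m).sum
      = (((doc.drop i).take m).map pvLineHash).sum := by
  rw [← List.map_drop, ← List.map_take]

-- main loop equivalence
lemma pvMain (doc mini : List String) (m : Nat) (hm : mini.length = m) (hm0 : 0 < m)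
    (hmn : m ≤ doc.length) :
    ∀ fuel2 i s, i + fuel2 = doc.length - m →
      s = (((doc.map pvLineHash).drop i).take m).sum →
      pvALoop doc mini m i (fuel2+1)
        = pvBLoop doc mini (doc.map pvLineHash) ((mini.map pvLineHash).sum) m i s fuel2 := by
  intro fuel2
  induction fuel2 with
  | zero =>
    intro i s hi hs
    rw [pvALoop, pvBLoop, pvAOk_eq doc mini i m 0 (by omega) (by omega),
        PySem.List.slice_natCast_add]
    simp only [Nat.add_zero, List.drop_zero]
    by_cases h : (doc.drop i).take m = mini
    · have hsum : s = (mini.map pvLineHash).sum := by rw [hs, pvWindowSum, h]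
      simp [h, hsum]
    · simp [h, pvALoop]
  | succ fuel2 ih =>
    intro i s hi hs
    have him : i + m < doc.length := by omega
    rw [pvALoop, pvBLoop, pvAOk_eq doc mini i m 0 (by omega) (by omega),
        PySem.List.slice_natCast_add]
    simp only [Nat.add_zero, List.drop_zero]
    by_cases h : (doc.drop i).take m = mini
    · have hsum : s = (mini.map pvLineHash).sum := by rw [hs, pvWindowSum, h]
      simp [h, hsum]
    · have hs' : s + (doc.map pvLineHash).getD (i+m) 0 - (doc.map pvLineHash).getD i 0
          = (((doc.map pvLineHash).drop (i+1)).take m).sum := by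
        rw [hs, pvRoll (doc.map pvLineHash) i m hm0 (by simpa using him)]
      rw [ih (i+1) (s + (doc.map pvLineHash).getD (i+m) 0 - (doc.map pvLineHash).getD i 0)
            (by omega) hs']
      simp [h]

-- ===== VERDICT (by name: the statement is the Claim_ definition above) =====
theorem find_subsequence_positions_spec : Claim_equal_find_subsequence_positions := by
  intro doc mini _
  unfold Spec_find_subsequence_positions
  unfold find_subsequence_positions find_subsequence_positions_alt
  by_cases hnil : mini = []
  · simp [hnil]
  · have hm0 : 0 < mini.length := List.length_pos_iff.mpr hnil
    simp only [if_neg hnil, if_neg (by omega : ¬ mini.length = 0)]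
    by_cases hlt : doc.length < mini.length
    · have : doc.length + 1 - mini.length = 0 := by omega
      simp [this, hlt, pvALoop]
    · push_neg at hlt
      simp only [if_neg (by omega : ¬ doc.length < mini.length)]
      have hfuel : doc.length + 1 - mini.length = (doc.length - mini.length) + 1 := by omega
      rw [hfuel]
      exact pvMain doc mini mini.length rfl hm0 hlt (doc.length - mini.length) 0 _
        (by omega) (by simp)
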